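-- pv_equiv track=rewrite | github.com/harshvs4/Leetcode_sol | my-folder/1392-find-the-difference-of-two-arrays/solution.py | findDifference
-- ===== SOURCE A (Python) =====
-- from typing import List
--
-- def findDifference(nums1: List[int], nums2: List[int]) -> List[List[int]]:
--     arr1 = []
--
--     for i in nums1:
--         if i not in nums2:
--             arr1.append(i)
--
--     arr2 = []
--
--     for i in nums2:
--         if i not in nums1:
--             arr2.append(i)
--
--     arr = []
--     arr.append(set(arr1))
--     arr.append(set(arr2))
--
--     return arr
-- ===== SOURCE B (Python) =====
-- from typing import List
--
-- def findDifference(nums1: List[int], nums2: List[int]) -> List[List[int]]: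
--     # Build one presence table: value -> (seen in nums1, seen in nums2).
--     marks = {}
--     for x in nums1:
--         marks[x] = (True, False)
--     for x in nums2:
--         first, _ = marks.get(x, (False, False))
--         marks[x] = (first, True)
--     # One pass over the table partitions the keys.
--     set1 = set()
--     set2 = set()
--     for k, (a, b) in marks.items():
--         if a and not b:
--             set1.add(k)
--         elif b and not a:
--             set2.add(k)
--     return [set1, set2]
-- ===== Notes on version B (the rewrite author's own statement) =====
-- stated objective: faster
-- what changed: Replaces the two nested per-element membership scans with one combined presence dictionary (value -> (in_nums1, in_nums2)) built in two linear passes and then partitioned in a single pass over its items.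
import Mathlib
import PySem

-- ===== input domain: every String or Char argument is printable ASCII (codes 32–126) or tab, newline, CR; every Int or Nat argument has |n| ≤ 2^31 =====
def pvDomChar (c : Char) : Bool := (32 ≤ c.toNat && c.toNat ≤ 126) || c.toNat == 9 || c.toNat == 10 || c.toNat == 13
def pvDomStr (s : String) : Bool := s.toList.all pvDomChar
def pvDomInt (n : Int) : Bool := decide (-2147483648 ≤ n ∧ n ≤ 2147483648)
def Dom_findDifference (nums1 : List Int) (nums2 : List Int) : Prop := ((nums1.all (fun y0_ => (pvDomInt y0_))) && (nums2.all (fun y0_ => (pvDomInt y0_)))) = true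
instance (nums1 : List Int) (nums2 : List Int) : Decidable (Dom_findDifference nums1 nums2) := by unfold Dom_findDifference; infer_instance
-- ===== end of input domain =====

-- B replaces A's nested per-element membership scans by one combined presence dictionary
-- (value -> (in_nums1, in_nums2)) built in two passes and partitioned in a single pass (faster).


-- ===== PORT A =====
def findDifference (nums1 : List Int) (nums2 : List Int) : List (List Int) :=
  let arr1 := nums1.foldl (fun acc i => if !(nums2.contains i) then acc ++ [i] else acc) []
  let arr2 := nums2.foldl (fun acc i => if !(nums1.contains i) then acc ++ [i] else acc) []
  [PySem.Set.ofList arr1, PySem.Set.ofList arr2]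

-- ===== PORT B =====
def findDifference_alt (nums1 : List Int) (nums2 : List Int) : List (List Int) :=
  let d1 := nums1.foldl (fun d x => d.insert x (true, false))
              (PySem.Dict.empty : PySem.Dict Int (Bool × Bool))
  let d2 := nums2.foldl (fun d x => d.insert x ((d.getD x (false, false)).1, true)) d1
  let p := d2.items.foldl
      (fun (s : PySem.Set Int × PySem.Set Int) kv =>
        if kv.2.1 && !kv.2.2 then (PySem.Set.add s.1 kv.1, s.2)
        else if kv.2.2 && !kv.2.1 then (s.1, PySem.Set.add s.2 kv.1)
        else s)
      (PySem.Set.empty, PySem.Set.empty)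
  [p.1, p.2]

-- ===== PRECONDITION & SPEC =====
def Spec_findDifference (nums1 : List Int) (nums2 : List Int) (out : List (List Int)) : Prop := out = findDifference_alt nums1 nums2
instance (nums1 : List Int) (nums2 : List Int) (out : List (List Int)) : Decidable (Spec_findDifference nums1 nums2 out) := by unfold Spec_findDifference; infer_instance

-- ===== CLAIM (what is proved, stated in full; the proofs are below) =====
def Claim_equal_findDifference : Prop := ∀ (nums1 : List Int) (nums2 : List Int), Dom_findDifference nums1 nums2 → Spec_findDifference nums1 nums2 (findDifference nums1 nums2)

-- ===== LEMMAS AND PROOFS =====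

-- adding a kept element commutes with filtering
lemma add_filter (p : Int → Bool) (t : List Int) (x : Int) (hp : p x = true) :
    (PySem.Set.add t x).filter p = PySem.Set.add (t.filter p) x := by
  by_cases h : x ∈ t
  · simp [PySem.Set.add, h, List.mem_filter, hp]
  · simp [PySem.Set.add, h, List.mem_filter, List.filter_append, hp]

lemma add_filter_not (p : Int → Bool) (t : List Int) (x : Int) (hp : p x = false) :
    (PySem.Set.add t x).filter p = t.filter p := by
  by_cases h : x ∈ t <;>
    simp [PySem.Set.add, h, List.filter_append, hp]

-- deduplicating a filtered list = filtering the deduplicated list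
lemma foldl_add_filter (p : Int → Bool) (xs : List Int) : ∀ (t : List Int),
    (xs.filter p).foldl PySem.Set.add (t.filter p) = (xs.foldl PySem.Set.add t).filter p := by
  induction xs with
  | nil => intro t; simp
  | cons x xs ih =>
    intro t
    by_cases hp : p x
    · simpa [List.filter_cons, hp, ← add_filter p t x hp] using ih (PySem.Set.add t x)
    · simp only [Bool.not_eq_true] at hp
      simpa [List.filter_cons, hp, ← add_filter_not p t x hp] using ih (PySem.Set.add t x)

lemma ofList_filter (p : Int → Bool) (xs : List Int) :
    PySem.Set.ofList (xs.filter p) = (PySem.Set.ofList xs).filter p := by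
  simpa [PySem.Set.ofList, PySem.Set.empty] using foldl_add_filter p xs []

-- the first loop of B: a constant-value insert fold looks up to the constant on its keys
lemma getD_foldl_insert_const (v df : Bool × Bool) (xs : List Int) :
    ∀ (d : PySem.Dict Int (Bool × Bool)) (k : Int),
      (xs.foldl (fun d x => d.insert x v) d).getD k df
        = if xs.contains k then v else d.getD k df := by
  induction xs with
  | nil => intro d k; simp
  | cons x xs ih =>
    intro d k
    rw [List.foldl_cons, ih]
    by_cases hk : k = x <;>
      simp [PySem.Dict.getD_insert, hk]

-- the second loop of B: marking keeps the first flag and sets the second on its keys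
lemma getD_foldl_mark (xs : List Int) :
    ∀ (d : PySem.Dict Int (Bool × Bool)) (k : Int),
      (xs.foldl (fun d x => d.insert x ((d.getD x (false, false)).1, true)) d).getD k (false, false)
        = if xs.contains k then ((d.getD k (false, false)).1, true)
          else d.getD k (false, false) := by
  induction xs with
  | nil => intro d k; simp
  | cons x xs ih =>
    intro d k
    rw [List.foldl_cons, ih]
    by_cases hk : k = x <;>
      simp [PySem.Dict.getD_insert, hk]

-- the last loop of B: partitioning a duplicate-free list of fresh keys appends the two filters
lemma foldl_partition (p q : Int → Bool) (hpq : ∀ k, p k = true → q k = false)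
    (L : List Int) :
    ∀ (a b : List Int), L.Nodup → (∀ k ∈ L, k ∉ a) → (∀ k ∈ L, k ∉ b) →
      L.foldl (fun (s : PySem.Set Int × PySem.Set Int) k =>
          if p k then (PySem.Set.add s.1 k, s.2)
          else if q k then (s.1, PySem.Set.add s.2 k) else s) (a, b)
        = (a ++ L.filter p, b ++ L.filter q) := by
  induction L with
  | nil => intro a b _ _ _; simp
  | cons x xs ih =>
    intro a b hnd ha hb
    have hxa : x ∉ a := ha x List.mem_cons_self
    have hxb : x ∉ b := hb x List.mem_cons_self
    have hxxs : x ∉ xs := (List.nodup_cons.mp hnd).1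
    have hnd' : xs.Nodup := (List.nodup_cons.mp hnd).2
    have ha' : ∀ k ∈ xs, k ∉ a := fun k hk => ha k (List.mem_cons_of_mem _ hk)
    have hb' : ∀ k ∈ xs, k ∉ b := fun k hk => hb k (List.mem_cons_of_mem _ hk)
    rw [List.foldl_cons]
    by_cases hp : p x
    · have hadd : PySem.Set.add a x = a ++ [x] := by simp [PySem.Set.add, hxa]
      have hax : ∀ k ∈ xs, k ∉ PySem.Set.add a x := by
        intro k hk
        rw [hadd]
        simp only [List.mem_append, List.mem_singleton, not_or]
        exact ⟨ha' k hk, fun h => hxxs (h ▸ hk)⟩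
      simp only [hp, if_true]
      rw [ih (PySem.Set.add a x) b hnd' hax hb']
      simp [hadd, hp, hpq x hp]
    · by_cases hq : q x
      · have hadd : PySem.Set.add b x = b ++ [x] := by simp [PySem.Set.add, hxb]
        have hbx : ∀ k ∈ xs, k ∉ PySem.Set.add b x := by
          intro k hk
          rw [hadd]
          simp only [List.mem_append, List.mem_singleton, not_or]
          exact ⟨hb' k hk, fun h => hxxs (h ▸ hk)⟩
        rw [Bool.not_eq_true] at hp
        simp only [hp, hq, Bool.false_eq_true, if_false, if_true]
        rw [ih a (PySem.Set.add b x) hnd' ha' hbx]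
        simp [hadd, hp, hq]
      · rw [Bool.not_eq_true] at hp hq
        simp only [hp, hq, Bool.false_eq_true, if_false]
        rw [ih a b hnd' ha' hb']
        simp [hp, hq]

-- ===== VERDICT (by name: the statement is the Claim_ definition above) =====
theorem findDifference_spec : Claim_equal_findDifference := by
  intro nums1 nums2 _
  unfold Spec_findDifference
  show findDifference nums1 nums2 = findDifference_alt nums1 nums2
  simp only [findDifference, findDifference_alt]
  set d1 : PySem.Dict Int (Bool × Bool) :=
    nums1.foldl (fun d x => d.insert x (true, false)) PySem.Dict.empty with hd1
  set d2 : PySem.Dict Int (Bool × Bool) :=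
    nums2.foldl (fun d x => d.insert x ((d.getD x (false, false)).1, true)) d1 with hd2
  -- lookups in d2
  have hval : ∀ k, d2.getD k (false, false)
      = if k ∈ nums2 then (decide (k ∈ nums1), true)
        else if k ∈ nums1 then (true, false) else (false, false) := by
    intro k
    rw [hd2, getD_foldl_mark, hd1, getD_foldl_insert_const]
    by_cases h2 : k ∈ nums2 <;> by_cases h1 : k ∈ nums1 <;> simp [h1, h2]
  -- keys of d2
  have hkeys : d2.keys = PySem.Set.ofList (nums1 ++ nums2) := by
    rw [hd2, PySem.Dict.keys_foldl_insert, hd1, PySem.Dict.keys_foldl_insert]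
    simp [PySem.Set.update, PySem.Set.ofList, PySem.Dict.keys_empty, PySem.Set.empty,
      List.foldl_append]
  have hnodup : d2.keys.Nodup := by
    rw [hd2]
    exact PySem.Dict.nodup_keys_foldl_insert _ _ _
      (by rw [hd1]; exact PySem.Dict.nodup_keys_foldl_insert _ _ _ PySem.Dict.nodup_keys_empty)
  -- items of d2 as a map over the keys
  have hitems : d2.items = d2.keys.map (fun k => (k, d2.getD k (false, false))) :=
    PySem.Dict.items_eq_map_keys d2 hnodup (false, false)
  rw [hitems, List.foldl_map]
  have hstep : (fun (s : PySem.Set Int × PySem.Set Int) (k : Int) =>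
        (fun (s : PySem.Set Int × PySem.Set Int) (kv : Int × (Bool × Bool)) =>
          if kv.2.1 && !kv.2.2 then (PySem.Set.add s.1 kv.1, s.2)
          else if kv.2.2 && !kv.2.1 then (s.1, PySem.Set.add s.2 kv.1)
          else s) s (k, d2.getD k (false, false)))
      = (fun (s : PySem.Set Int × PySem.Set Int) (k : Int) =>
          if (nums1.contains k && !nums2.contains k) then (PySem.Set.add s.1 k, s.2)
          else if (nums2.contains k && !nums1.contains k) then (s.1, PySem.Set.add s.2 k)
          else s) := by
    funext s k
    rw [hval k]
    by_cases h2 : k ∈ nums2 <;> by_cases h1 : k ∈ nums1 <;> simp [h1, h2]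
  rw [hstep, foldl_partition _ _
        (by intro k h
            by_cases h1 : k ∈ nums1 <;> by_cases h2 : k ∈ nums2 <;> simp_all)
        _ PySem.Set.empty PySem.Set.empty
        hnodup (by simp [PySem.Set.empty]) (by simp [PySem.Set.empty])]
  -- identify the two filtered key lists with A's two sets
  have hfil1 : d2.keys.filter (fun k => nums1.contains k && !nums2.contains k)
      = PySem.Set.ofList (nums1.filter (fun i => !nums2.contains i)) := by
    rw [hkeys, ← ofList_filter, List.filter_append]
    have h2 : nums2.filter (fun k => nums1.contains k && !nums2.contains k) = [] := by
      rw [List.filter_eq_nil_iff]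
      intro k hk
      simp [hk]
    have h1 : nums1.filter (fun k => nums1.contains k && !nums2.contains k)
        = nums1.filter (fun i => !nums2.contains i) := by
      apply List.filter_congr
      intro k hk
      simp [hk]
    rw [h1, h2, List.append_nil]
  have hfil2 : d2.keys.filter (fun k => nums2.contains k && !nums1.contains k)
      = PySem.Set.ofList (nums2.filter (fun i => !nums1.contains i)) := by
    rw [hkeys, ← ofList_filter, List.filter_append]
    have h1 : nums1.filter (fun k => nums2.contains k && !nums1.contains k) = [] := by
      rw [List.filter_eq_nil_iff]
      intro k hk
      simp [hk]
    have h2 : nums2.filter (fun k => nums2.contains k && !nums1.contains k)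
        = nums2.filter (fun i => !nums1.contains i) := by
      apply List.filter_congr
      intro k hk
      simp [hk]
    rw [h1, h2, List.nil_append]
  rw [hfil1, hfil2]
  -- A's loops are filters
  have hA1 : nums1.foldl (fun acc i => if !(nums2.contains i) then acc ++ [i] else acc) []
      = nums1.filter (fun i => !nums2.contains i) := by
    simpa using PySem.List.foldl_append_if (fun i => !nums2.contains i) id nums1 []
  have hA2 : nums2.foldl (fun acc i => if !(nums1.contains i) then acc ++ [i] else acc) []
      = nums2.filter (fun i => !nums1.contains i) := by
    simpa using PySem.List.foldl_append_if (fun i => !nums1.contains i) id nums2 []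
  rw [hA1, hA2]
  simp [PySem.Set.empty]
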